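-- pv_equiv track=rewrite | github.com/belfastkeyboard/TARA | spellcheck/utils.py | prepare_text_for_analysis
-- ===== SOURCE A (Python) =====
-- def prepare_text_for_analysis(text: str) -> tuple[list[str], list[int]]:
--
--     """
--     Breaks text into clauses without punctuation for spellchecking.
--
--     Returns a tuple: clauses, indices.
--     Clauses are used for analysis, indices are needed to re-stitch text after processing.
--
--     Call restitch_text to re-stitch text.
--     """
--
--     indices = []
--     strings = []
--     current_str = []
--
--     for i, char in enumerate(text):
--         if _is_punctuation(char):
--             clause = "".join(current_str)
--             if clause:
--                 strings.append(clause)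
--             current_str.clear()
--             indices.append(i)
--         else:
--             current_str.append(char)
--
--     if current_str:
--         clause = "".join(current_str)
--         if clause:
--             strings.append(clause)
--
--     return strings, indices
--
-- def _is_punctuation(char: str) -> bool:
--     return char in ",.;:!?—*‘’()"
-- ===== SOURCE B (Python) =====
-- def _is_punctuation(char: str) -> bool:
--     return char in ",.;:!?\u2014*\u2018\u2019()"
--
-- def prepare_text_for_analysis(text: str) -> tuple[list[str], list[int]]:
--     indices = [i for i, c in enumerate(text) if _is_punctuation(c)]
--     strings = []
--     prev = 0
--     for idx in indices:
--         seg = text[prev:idx]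
--         if seg:
--             strings.append(seg)
--         prev = idx + 1
--     seg = text[prev:]
--     if seg:
--         strings.append(seg)
--     return strings, indices
-- ===== Notes on version B (the rewrite author's own statement) =====
-- stated objective: simpler
-- what changed: B first collects all punctuation indices in one comprehension, then builds clauses by slicing the text between consecutive boundaries, instead of A's per-character list accumulation with join/clear.
import Mathlib
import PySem

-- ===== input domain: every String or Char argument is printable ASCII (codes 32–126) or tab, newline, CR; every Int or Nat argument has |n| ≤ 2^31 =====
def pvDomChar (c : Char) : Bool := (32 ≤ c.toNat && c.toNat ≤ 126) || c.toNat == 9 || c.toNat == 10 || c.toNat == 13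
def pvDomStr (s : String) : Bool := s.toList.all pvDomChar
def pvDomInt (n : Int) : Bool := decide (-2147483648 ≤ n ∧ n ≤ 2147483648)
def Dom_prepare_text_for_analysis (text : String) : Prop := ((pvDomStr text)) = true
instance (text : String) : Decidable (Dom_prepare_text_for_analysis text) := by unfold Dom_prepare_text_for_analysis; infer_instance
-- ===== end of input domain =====

-- B collects the punctuation indices first and then slices the text between consecutive
-- boundaries, instead of A's per-character accumulator list with join/clear (objective: simpler).

-- ===== PORT A =====
-- char in ",.;:!?—*‘’()"  (single-character membership = list contains; exact)
def _is_punctuation (c : Char) : Bool := ",.;:!?—*‘’()".toList.contains c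

-- the body of A's for-loop over enumerate(text); state = (indices, strings, current_str)
def pvStepA (st : List Int × List String × List Char) (ic : Int × Char) :
    List Int × List String × List Char :=
  if _is_punctuation ic.2 then
    let clause := String.ofList st.2.2
    (st.1 ++ [ic.1], (if clause ≠ "" then st.2.1 ++ [clause] else st.2.1), [])
  else (st.1, st.2.1, st.2.2 ++ [ic.2])

def prepare_text_for_analysis (text : String) : List String × List Int :=
  let r := (PySem.List.enumerate text.toList 0).foldl pvStepA ([], [], [])
  let strings :=
    if r.2.2 ≠ [] then
      (let clause := String.ofList r.2.2
       if clause ≠ "" then r.2.1 ++ [clause] else r.2.1)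
    else r.2.1
  (strings, r.1)

-- ===== PORT B =====
-- the body of B's for-loop over the collected indices; state = (strings, prev)
def pvStepB (l : List Char) (st : List String × Int) (idx : Int) : List String × Int :=
  let seg := PySem.List.slice l (some st.2) (some idx)
  ((if seg ≠ [] then st.1 ++ [String.ofList seg] else st.1), idx + 1)

def prepare_text_for_analysis_alt (text : String) : List String × List Int :=
  let l := text.toList
  let indices : List Int := (PySem.List.enumerate l 0).filterMap
      (fun ic => if _is_punctuation ic.2 then some ic.1 else none)
  let r := indices.foldl (pvStepB l) ([], 0)
  let seg := PySem.List.slice l (some r.2) none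
  ((if seg ≠ [] then r.1 ++ [String.ofList seg] else r.1), indices)

-- ===== PRECONDITION & SPEC =====
def Spec_prepare_text_for_analysis (text : String) (out : List String × List Int) : Prop := out = prepare_text_for_analysis_alt text
instance (text : String) (out : List String × List Int) : Decidable (Spec_prepare_text_for_analysis text out) := by unfold Spec_prepare_text_for_analysis; infer_instance

-- ===== CLAIM (what is proved, stated in full; the proofs are below) =====
def Claim_equal_prepare_text_for_analysis : Prop := ∀ (text : String), Dom_prepare_text_for_analysis text → Spec_prepare_text_for_analysis text (prepare_text_for_analysis text)

-- ===== LEMMAS AND PROOFS =====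

-- canonical recursive description of the splitting, used as the bridge between the two ports
def pvSpec (l : List Char) (i : Int) (cur : List Char) : List String × List Int :=
  match l with
  | [] => ((if cur ≠ [] then [String.ofList cur] else []), [])
  | c :: rest =>
    if _is_punctuation c then
      let r := pvSpec rest (i + 1) []
      ((if cur ≠ [] then String.ofList cur :: r.1 else r.1), i :: r.2)
    else pvSpec rest (i + 1) (cur ++ [c])

theorem pv_lemA (l : List Char) (i : Int) (inds : List Int) (strs : List String)
    (cur : List Char) :
    (let r := (PySem.List.enumerate l i).foldl pvStepA (inds, strs, cur)
     ((if r.2.2 ≠ [] then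
        (let clause := String.ofList r.2.2
         if clause ≠ "" then r.2.1 ++ [clause] else r.2.1)
       else r.2.1), r.1))
    = (strs ++ (pvSpec l i cur).1, inds ++ (pvSpec l i cur).2) := by
  induction l generalizing i inds strs cur with
  | nil =>
    simp [PySem.List.enumerate_nil, pvSpec]
    by_cases h : cur = [] <;> simp [h]
  | cons c rest ih =>
    simp only [PySem.List.enumerate_cons, List.foldl_cons]
    by_cases hp : _is_punctuation c
    · simp only [pvStepA, hp, if_pos, pvSpec]
      rw [ih]
      by_cases h : cur = [] <;>
        simp [h]
    · simp only [pvStepA, hp, pvSpec, if_neg, Bool.false_eq_true, not_false_iff]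
      rw [ih]

theorem pv_lemInd (l : List Char) (i : Int) (cur : List Char) :
    (pvSpec l i cur).2 = (PySem.List.enumerate l i).filterMap
      (fun ic => if _is_punctuation ic.2 then some ic.1 else none) := by
  induction l generalizing i cur with
  | nil => simp [pvSpec, PySem.List.enumerate_nil]
  | cons c rest ih =>
    by_cases hp : _is_punctuation c <;>
      simp [pvSpec, PySem.List.enumerate_cons, hp, ih]

theorem pv_lemB (L : List Char) (rest : List Char) (i prev : Nat) (strs : List String)
    (hrest : rest = L.drop i) (hi : i ≤ L.length) (hp : prev ≤ i) :
    (let r := ((pvSpec rest (i : Int) ((L.drop prev).take (i - prev))).2).foldl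
        (pvStepB L) (strs, (prev : Int))
     (if PySem.List.slice L (some r.2) none ≠ [] then
        r.1 ++ [String.ofList (PySem.List.slice L (some r.2) none)]
      else r.1))
    = strs ++ (pvSpec rest (i : Int) ((L.drop prev).take (i - prev))).1 := by
  induction rest generalizing i prev strs with
  | nil =>
    have hlen : i = L.length := by
      have := congrArg List.length hrest
      simp at this; omega
    have hcur : (L.drop prev).take (i - prev) = L.drop prev := by
      apply List.take_of_length_le; simp; omega
    simp only [pvSpec, List.foldl_nil, hcur, PySem.List.slice_from_natCast]
    by_cases h : L.drop prev = [] <;> simp [h]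
  | cons c rest' ih =>
    have hlt : i < L.length := by
      by_contra h
      rw [List.drop_eq_nil_of_le (by omega)] at hrest
      simp at hrest
    have hget : L[i]? = some c := by
      have h0 : (L.drop i)[0]? = some c := by rw [← hrest]; simp
      rwa [List.getElem?_drop, Nat.add_zero] at h0
    have hrest' : rest' = L.drop (i + 1) := by
      have : (L.drop i).tail = L.drop (i + 1) := by
        rw [List.tail_drop]
      rw [← hrest] at this; simpa using this
    by_cases hpc : _is_punctuation c
    · simp only [pvSpec, hpc, if_pos, List.foldl_cons]
      have hslice : PySem.List.slice L (some (prev : Int)) (some (i : Int))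
          = (L.drop prev).take (i - prev) := PySem.List.slice_natCast ..
      have hstep : pvStepB L (strs, (prev : Int)) (i : Int)
          = ((if (L.drop prev).take (i - prev) ≠ [] then
                strs ++ [String.ofList ((L.drop prev).take (i - prev))] else strs),
             (i : Int) + 1) := by
        simp [pvStepB, hslice]
      rw [hstep]
      have hcast : ((i : Int) + 1) = ((i + 1 : Nat) : Int) := by push_cast; ring
      rw [hcast]
      have hcur0 : (L.drop (i + 1)).take ((i + 1) - (i + 1)) = ([] : List Char) := by simp
      have := ih (i + 1) (i + 1)
        (if (L.drop prev).take (i - prev) ≠ [] then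
            strs ++ [String.ofList ((L.drop prev).take (i - prev))] else strs)
        hrest' (by omega) (by omega)
      rw [hcur0] at this
      rw [this]
      by_cases h : (L.drop prev).take (i - prev) = [] <;> simp [h]
    · simp only [pvSpec, hpc, Bool.false_eq_true, if_neg, not_false_iff]
      have htake : (L.drop prev).take ((i + 1) - prev)
          = (L.drop prev).take (i - prev) ++ [c] := by
        have h1 : (i + 1) - prev = (i - prev) + 1 := by omega
        rw [h1, List.take_add_one]
        have : (L.drop prev)[i - prev]? = some c := by
          rw [List.getElem?_drop]
          have : prev + (i - prev) = i := by omega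
          rw [this, hget]
        simp [this]
      have hcast : ((i : Int) + 1) = ((i + 1 : Nat) : Int) := by push_cast; ring
      rw [hcast, ← htake]
      exact ih (i + 1) prev strs hrest' (by omega) (by omega)

-- ===== VERDICT (by name: the statement is the Claim_ definition above) =====
theorem prepare_text_for_analysis_spec : Claim_equal_prepare_text_for_analysis := by
  intro text _
  unfold Spec_prepare_text_for_analysis prepare_text_for_analysis prepare_text_for_analysis_alt
  have hA := pv_lemA text.toList 0 [] [] []
  have hInd := pv_lemInd text.toList 0 []
  have hB := pv_lemB text.toList text.toList 0 0 [] (by simp) (by omega) (by omega)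
  simp only [Nat.cast_zero, Nat.sub_zero, List.drop_zero, List.take_zero,
    List.nil_append] at hA hB ⊢
  rw [← hInd, hB, ← hA]
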